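-- pv_equiv track=rewrite | github.com/wwang2/no-three-in-line-agile-finch | orbits/02-deterministic-closed-form/constructor.py | hyperbola
-- ===== SOURCE A (Python) =====
-- from typing import Iterable, List, Sequence, Tuple
--
-- Point = Tuple[int, int]
--
-- def hyperbola(a: int, p: int = 11) -> List[Point]:
--     """Points (x, y) with x, y in 0..p-1 satisfying x*y ≡ a (mod p)."""
--     pts = []
--     if a == 0:
--         # Degenerate: the union of the x=0 and y=0 lines (too collinear).
--         return []
--     for x in range(1, p):
--         # y = a * x^{-1} mod p
--         # x^{-1} mod p via extended Euclid (or pow(x, -1, p) in Python 3.8+).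
--         y = (a * pow(x, -1, p)) % p
--         pts.append((x, y))
--     return pts
-- ===== SOURCE B (Python) =====
-- def hyperbola(a, p=11):
--     """Points (x, y) with x, y in 0..p-1 satisfying x*y ≡ a (mod p)."""
--     if a == 0:
--         return []
--     pts = []
--     for x in range(1, p):
--         # brute-force scan: the matching y is unique when x is invertible mod p
--         for y in range(p):
--             if (x * y - a) % p == 0:
--                 pts.append((x, y))
--                 break
--     return pts
-- ===== Notes on version B (the rewrite author's own statement) =====
-- stated objective: alternative
-- what changed: B finds each x's unique partner y by a brute-force inner scan over range(p) testing (x*y - a) % p == 0 with a break, instead of computing y in closed form via the modular inverse pow(x, -1, p).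
import Mathlib
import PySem

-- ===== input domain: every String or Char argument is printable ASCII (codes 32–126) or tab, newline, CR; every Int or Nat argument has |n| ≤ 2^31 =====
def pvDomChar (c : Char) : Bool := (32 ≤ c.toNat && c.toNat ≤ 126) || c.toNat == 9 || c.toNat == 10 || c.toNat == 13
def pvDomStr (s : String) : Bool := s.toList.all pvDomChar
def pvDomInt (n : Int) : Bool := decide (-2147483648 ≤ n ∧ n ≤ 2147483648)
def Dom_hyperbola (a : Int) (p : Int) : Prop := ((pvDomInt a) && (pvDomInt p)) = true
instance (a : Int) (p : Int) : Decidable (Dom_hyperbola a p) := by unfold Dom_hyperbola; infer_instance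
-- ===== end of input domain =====

-- B replaces A's modular-inverse closed form with a plain nested scan for the unique matching y;
-- objective: alternative (no inverse computation; same output, O(p^2) instead of O(p log p)).

-- ===== PORT A =====
-- pow(x, -1, p): exact where Int.gcd x p = 1 and 1 ≤ x < p (elsewhere Python's pow raises
-- ValueError — those inputs are excluded by Pre_hyperbola).
def pyInvMod (x p : Int) : Int := PySem.Int.mod (Int.gcdA x p) p

def hyperbola (a : Int) (p : Int) : List (Int × Int) :=
  if a = 0 then []
  else
    (PySem.List.pyRange 1 p 1).foldl
      (fun pts x => pts ++ [(x, PySem.Int.mod (a * pyInvMod x p) p)]) []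

-- ===== PORT B =====
def hyperbola_alt (a : Int) (p : Int) : List (Int × Int) :=
  if a = 0 then []
  else
    (PySem.List.pyRange 1 p 1).foldl
      (fun pts x =>
        -- inner 'for y in range(p): if (x*y - a) % p == 0: append; break'
        match (PySem.List.pyRange 0 p 1).find? (fun y => PySem.Int.mod (x * y - a) p == 0) with
        | some y => pts ++ [(x, y)]
        | none => pts) []

-- ===== PRECONDITION & SPEC =====
-- Pre_ excludes exactly the inputs where Python's pow(x, -1, p) raises ValueError (a ≠ 0 and
-- p ≥ 2 not prime, i.e. some x in 1..p-1 not invertible mod p); A returns nowhere outside Pre_.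
def Pre_hyperbola (a : Int) (p : Int) : Prop :=
  a = 0 ∨ p ≤ 1 ∨ Nat.Prime p.toNat
instance (a : Int) (p : Int) : Decidable (Pre_hyperbola a p) := by unfold Pre_hyperbola; infer_instance

def pvWitness_hyperbola : Int × Int := (3, 7)

def Spec_hyperbola (a : Int) (p : Int) (out : List (Int × Int)) : Prop := out = hyperbola_alt a p
instance (a : Int) (p : Int) (out : List (Int × Int)) : Decidable (Spec_hyperbola a p out) := by unfold Spec_hyperbola; infer_instance

-- ===== CLAIM (what is proved, stated in full; the proofs are below) =====
def Claim_equal_hyperbola : Prop := ∀ (a : Int) (p : Int), Dom_hyperbola a p → Pre_hyperbola a p → Spec_hyperbola a p (hyperbola a p)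

-- ===== LEMMAS AND PROOFS =====

-- every x in 1..p-1 is coprime with a prime p
theorem gcd_one_of_prime (p x : Int) (hp : Nat.Prime p.toNat)
    (hx1 : 1 ≤ x) (hx2 : x < p) : Int.gcd x p = 1 := by
  have h1 : x.natAbs = x.toNat := by omega
  have h2 : p.natAbs = p.toNat := by omega
  have hlt : x.toNat < p.toNat := by omega
  have hpos : 0 < x.toNat := by omega
  have hnd : ¬ p.toNat ∣ x.toNat := fun hd => by
    have := Nat.le_of_dvd hpos hd; omega
  have := (Nat.Prime.coprime_iff_not_dvd hp).mpr hnd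
  unfold Int.gcd
  rw [h1, h2]
  exact Nat.coprime_comm.mp this

-- find? over range(lo, hi) returns y0 when pred holds at y0 and fails strictly below it.
theorem find?_pyRange_first (hi y0 : Int) (pred : Int → Bool) (hp : pred y0 = true) :
    ∀ (n : Nat) (lo : Int), (y0 - lo).toNat = n → lo ≤ y0 → y0 < hi →
      (∀ y, lo ≤ y → y < y0 → pred y = false) →
      (PySem.List.pyRange lo hi 1).find? pred = some y0 := by
  intro n
  induction n with
  | zero =>
    intro lo hn hlo hhi _
    have : lo = y0 := by omega
    subst this
    rw [PySem.List.pyRange_one_cons hhi, List.find?_cons, hp]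
  | succ n ih =>
    intro lo hn hlo hhi hmin
    have hlt : lo < y0 := by omega
    rw [PySem.List.pyRange_one_cons (lt_trans hlt hhi), List.find?_cons,
        hmin lo le_rfl hlt]
    exact ih (lo + 1) (by omega) (by omega) hhi (fun y h1 h2 => hmin y (by omega) h2)

-- the y A computes is the unique y in 0..p-1 with x*y ≡ a (mod p)
theorem y0_spec (a p x : Int) (hx1 : 1 ≤ x) (hx2 : x < p) (hg : Int.gcd x p = 1) :
    0 ≤ PySem.Int.mod (a * pyInvMod x p) p ∧
    PySem.Int.mod (a * pyInvMod x p) p < p ∧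
    PySem.Int.mod (x * PySem.Int.mod (a * pyInvMod x p) p - a) p = 0 ∧
    ∀ y, 0 ≤ y → y < PySem.Int.mod (a * pyInvMod x p) p →
      PySem.Int.mod (x * y - a) p ≠ 0 := by
  have hp : (0:Int) < p := by omega
  set y0 := PySem.Int.mod (a * pyInvMod x p) p with hy0
  have hy0e : y0 = (a * (Int.gcdA x p % p)) % p := by
    simp [hy0, pyInvMod, PySem.Int.mod_eq_emod_of_pos hp]
  -- x * gcdA x p ≡ 1 [ZMOD p]
  have hinv : x * Int.gcdA x p ≡ 1 [ZMOD p] := by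
    have hab := Int.gcd_eq_gcd_ab x p
    rw [hg] at hab
    rw [Int.modEq_iff_dvd]
    exact ⟨Int.gcdB x p, by push_cast at hab; linarith⟩
  -- y0 ≡ a * gcdA x p [ZMOD p]
  have hcong : y0 ≡ a * Int.gcdA x p [ZMOD p] := by
    rw [hy0e]
    calc (a * (Int.gcdA x p % p)) % p
        ≡ a * (Int.gcdA x p % p) [ZMOD p] := Int.emod_emod_of_dvd _ dvd_rfl
      _ ≡ a * Int.gcdA x p [ZMOD p] :=
          Int.ModEq.mul_left a (Int.emod_emod_of_dvd _ dvd_rfl)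
  have hmain : x * y0 ≡ a [ZMOD p] := by
    calc x * y0 ≡ x * (a * Int.gcdA x p) [ZMOD p] := Int.ModEq.mul_left x hcong
      _ = a * (x * Int.gcdA x p) := by ring
      _ ≡ a * 1 [ZMOD p] := Int.ModEq.mul_left a hinv
      _ = a := by ring
  have h0 : 0 ≤ y0 := PySem.Int.mod_nonneg _ hp
  have h1 : y0 < p := PySem.Int.mod_lt _ hp
  refine ⟨h0, h1, ?_, ?_⟩
  · rw [PySem.Int.mod_eq_zero_iff_dvd]
    exact dvd_sub_comm.mp (Int.modEq_iff_dvd.mp hmain)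
  · intro y hy0' hylt hmod
    have hdvd : p ∣ x * y - a := (PySem.Int.mod_eq_zero_iff_dvd _ _).mp hmod
    have hy : x * y ≡ a [ZMOD p] := by
      rw [Int.modEq_iff_dvd]
      exact dvd_sub_comm.mp hdvd
    -- cancel x (coprime to p): y ≡ y0
    have hxy : x * y ≡ x * y0 [ZMOD p] := hy.trans hmain.symm
    have hyy0 : y ≡ y0 [ZMOD p] := by
      calc y = 1 * y := by ring
        _ ≡ (x * Int.gcdA x p) * y [ZMOD p] := (Int.ModEq.mul_right y hinv).symm
        _ = Int.gcdA x p * (x * y) := by ring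
        _ ≡ Int.gcdA x p * (x * y0) [ZMOD p] := Int.ModEq.mul_left _ hxy
        _ = (x * Int.gcdA x p) * y0 := by ring
        _ ≡ 1 * y0 [ZMOD p] := Int.ModEq.mul_right y0 hinv
        _ = y0 := by ring
    have : y % p = y0 % p := hyy0
    rw [Int.emod_eq_of_lt hy0' (by omega), Int.emod_eq_of_lt h0 h1] at this
    omega

theorem step_eq (a p x : Int) (hx : x ∈ PySem.List.pyRange 1 p 1) (hg : Int.gcd x p = 1) :
    (PySem.List.pyRange 0 p 1).find? (fun y => PySem.Int.mod (x * y - a) p == 0)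
      = some (PySem.Int.mod (a * pyInvMod x p) p) := by
  rw [PySem.List.mem_pyRange_one] at hx
  obtain ⟨h0, h1, h2, h3⟩ := y0_spec a p x hx.1 hx.2 hg
  exact find?_pyRange_first p _ _ (by simp [h2]) _ 0 rfl h0 h1
    (fun y hy1 hy2 => by simp [h3 y hy1 hy2])

-- ===== VERDICT (by name: the statement is the Claim_ definition above) =====
theorem hyperbola_spec : Claim_equal_hyperbola := by
  intro a p _ hpre
  unfold Spec_hyperbola hyperbola hyperbola_alt
  by_cases ha : a = 0
  · simp [ha]
  · rcases hpre with h | h | h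
    · exact absurd h ha
    · simp [PySem.List.pyRange_one_eq_nil h]
    · have hall : ∀ x ∈ PySem.List.pyRange 1 p 1, Int.gcd x p = 1 := fun x hx => by
        rw [PySem.List.mem_pyRange_one] at hx
        exact gcd_one_of_prime p x h hx.1 hx.2
      simp only [if_neg ha]
      refine PySem.List.foldl_congr_mem _ _ _ _ ?_
      intro acc x hx
      rw [step_eq a p x hx (hall x hx)]
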